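-- pv_equiv track=rewrite | github.com/Haroons23/ML-Projects | tfidf_for_text_summarization/tfidf.py | get_word_frequency
-- ===== SOURCE A (Python) =====
-- def get_word_frequency(documents):
--
--     frequency = {}
--
--     # Go through each document.
--     for doc_num in range(len(documents)):
--
--         # Go through each word in document.
--     	for word in documents[doc_num]:
--
--     		# Word has appeared but its the first time in this document.
--     		if word in frequency and len(frequency[word]) == doc_num:
--     			frequency[word].append(documents[doc_num].count(word))
--
--     		# Word hasn't appeared yet. Create array pad previous doc values with zero.
--     		elif word not in frequency:
--     			frequency[word] = []
--     			for i in range(doc_num):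
--     				frequency[word].append(0)
--
--     			frequency[word].append(documents[doc_num].count(word))
--
--     	# Add a zero to all the word counts that didn't appear in the current document.
--     	for word in frequency:
--     		if len(frequency[word]) < doc_num + 1:
--     			frequency[word].append(0)
--
--     return frequency
-- ===== SOURCE B (Python) =====
-- def get_word_frequency(documents):
--     # Two-phase rewrite: per-document tallies + first-appearance word order,
--     # then assemble each full row by transposing over the tallies.
--     tallies = []
--     for doc in documents:
--         t = {}
--         for w in doc:
--             t[w] = t.get(w, 0) + 1
--         tallies.append(t)
--     order = dict.fromkeys(w for doc in documents for w in doc)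
--     return {w: [t.get(w, 0) for t in tallies] for w in order}
-- ===== Notes on version B (the rewrite author's own statement) =====
-- stated objective: alternative
-- what changed: Replaces A's incremental maintain-and-zero-pad dict (a repeated doc.count scan per word and a full pad pass over the vocabulary after every document) by a two-phase build: one linear tally dict per document plus a first-appearance word order, then each row assembled in a second pass by transposing over the tallies.
import Mathlib
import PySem

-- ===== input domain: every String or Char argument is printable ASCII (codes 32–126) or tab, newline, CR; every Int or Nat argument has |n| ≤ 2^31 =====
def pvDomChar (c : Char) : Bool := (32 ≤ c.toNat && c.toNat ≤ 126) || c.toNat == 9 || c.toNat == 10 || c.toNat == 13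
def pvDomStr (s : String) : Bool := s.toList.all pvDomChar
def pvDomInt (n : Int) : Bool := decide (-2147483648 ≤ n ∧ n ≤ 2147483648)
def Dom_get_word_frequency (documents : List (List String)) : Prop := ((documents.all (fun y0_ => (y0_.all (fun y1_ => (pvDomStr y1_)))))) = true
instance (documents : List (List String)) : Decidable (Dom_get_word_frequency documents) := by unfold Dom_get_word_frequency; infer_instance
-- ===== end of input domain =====

-- B replaces A's maintain-and-pad dict loop by a two-phase build: per-document tallies plus
-- a first-appearance word order, rows then assembled by transposing over the tallies.


-- ===== PORT A =====
-- inner word-loop body: the two dict branches of A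
def pvWordStep (doc : List String) (docNum : Nat) (f : PySem.Dict String (List Int)) (word : String) : PySem.Dict String (List Int) :=
  match f.get? word with
  | some xs =>
      -- word in frequency and len(frequency[word]) == doc_num
      if xs.length = docNum then f.insert word (xs ++ [(doc.count word : Int)]) else f
  | none =>
      -- word not in frequency: pad with doc_num zeros (the range(doc_num) loop), then append the count
      f.insert word ((List.range docNum).foldl (fun acc _ => acc ++ [(0 : Int)]) [] ++ [(doc.count word : Int)])

-- trailing pad loop body: append a zero to every row still shorter than doc_num + 1
def pvPadStep (docNum : Nat) (g : PySem.Dict String (List Int)) (word : String) : PySem.Dict String (List Int) :=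
  match g.get? word with
  | some xs => if xs.length < docNum + 1 then g.insert word (xs ++ [(0 : Int)]) else g
  | none => g

def pvDocStep (docNum : Nat) (f : PySem.Dict String (List Int)) (doc : List String) : PySem.Dict String (List Int) :=
  let f1 := doc.foldl (pvWordStep doc docNum) f
  f1.keys.foldl (pvPadStep docNum) f1

-- 'for doc_num in range(len(documents)): … documents[doc_num] …' as a fold carrying doc_num
def get_word_frequency (documents : List (List String)) : List (String × List Int) :=
  (documents.foldl
      (fun (st : PySem.Dict String (List Int) × Nat) doc => (pvDocStep st.2 st.1 doc, st.2 + 1))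
      (PySem.Dict.empty, 0)).1.items

-- ===== PORT B =====
-- per-document tally dict: t[w] = t.get(w, 0) + 1
def pvTally (doc : List String) : PySem.Dict String Int :=
  doc.foldl (fun t w => t.insert w (t.getD w 0 + 1)) PySem.Dict.empty

def get_word_frequency_alt (documents : List (List String)) : List (String × List Int) :=
  let tallies := documents.map pvTally
  let order := PySem.List.dedup (documents.flatMap (fun doc => doc))
  order.map (fun w => (w, tallies.map (fun t => t.getD w 0)))

-- ===== PRECONDITION & SPEC =====
def Spec_get_word_frequency (documents : List (List String)) (out : List (String × List Int)) : Prop := out = get_word_frequency_alt documents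
instance (documents : List (List String)) (out : List (String × List Int)) : Decidable (Spec_get_word_frequency documents out) := by unfold Spec_get_word_frequency; infer_instance

-- ===== CLAIM (what is proved, stated in full; the proofs are below) =====
def Claim_equal_get_word_frequency : Prop := ∀ (documents : List (List String)), Dom_get_word_frequency documents → Spec_get_word_frequency documents (get_word_frequency documents)

-- ===== LEMMAS AND PROOFS =====

-- the key list after the word loop has seen the words `seen`, on top of vocabulary Ol
def pvKeyL (Ol seen : List String) : List String :=
  Ol ++ List.filter (fun y => !(PySem.Set.contains Ol y)) (PySem.Set.ofList seen)

-- row value before the current document touches w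
def pvBase (Ol : List String) (row : String → List Int) (k : Nat) (w : String) : List Int :=
  if w ∈ Ol then row w else List.replicate k 0

-- row value after the word loop has seen the words `seen`
def pvRowA (Ol : List String) (row : String → List Int) (k : Nat) (d seen : List String) (w : String) : List Int :=
  pvBase Ol row k w ++ (if w ∈ seen then [(d.count w : Int)] else [])

lemma mem_pvKeyL (Ol seen : List String) (x : String) :
    x ∈ pvKeyL Ol seen ↔ x ∈ Ol ∨ x ∈ seen := by
  simp [pvKeyL, List.mem_filter, PySem.Set.mem_ofList, PySem.Set.contains]
  tauto

lemma nodup_pvKeyL (Ol seen : List String) (hnd : Ol.Nodup) : (pvKeyL Ol seen).Nodup := by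
  refine List.Nodup.append hnd ((PySem.Set.nodup_ofList seen).filter _) ?_
  intro x hx hx2
  simp [List.mem_filter, PySem.Set.contains, PySem.Set.mem_ofList] at hx2
  exact hx2.2 hx

lemma ofList_append_singleton_mem (seen : List String) (x : String) (h : x ∈ seen) :
    PySem.Set.ofList (seen ++ [x]) = PySem.Set.ofList seen := by
  rw [PySem.Set.ofList_append, PySem.Set.update_cons, PySem.Set.update_nil]
  simp [PySem.Set.add, PySem.Set.contains, PySem.Set.mem_ofList, h]

lemma ofList_append_singleton_not_mem (seen : List String) (x : String) (h : x ∉ seen) :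
    PySem.Set.ofList (seen ++ [x]) = PySem.Set.ofList seen ++ [x] := by
  rw [PySem.Set.ofList_append, PySem.Set.update_cons, PySem.Set.update_nil]
  simp [PySem.Set.add, PySem.Set.contains, PySem.Set.mem_ofList, h]

lemma keys_of_items_map (F : PySem.Dict String (List Int)) (L : List String) (g : String → List Int)
    (hF : F.items = L.map fun w => (w, g w)) : F.keys = L := by
  show F.items.map (·.1) = L
  simp [hF, Function.comp_def]

lemma get?_of_items_map (F : PySem.Dict String (List Int)) (L : List String) (g : String → List Int)
    (hF : F.items = L.map fun w => (w, g w)) (hnd : L.Nodup) (x : String) :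
    F.get? x = if x ∈ L then some (g x) else none := by
  have hkeys := keys_of_items_map F L g hF
  split_ifs with hx
  · exact PySem.Dict.get?_of_mem_items F (by rw [hF]; exact List.mem_map_of_mem hx) (hkeys ▸ hnd)
  · exact (PySem.Dict.get?_eq_none_iff_not_mem_keys F x).2 (hkeys ▸ hx)

lemma range_fold_zeros (k : Nat) :
    (List.range k).foldl (fun acc _ => acc ++ [(0 : Int)]) [] = List.replicate k 0 := by
  rw [PySem.List.foldl_append_singleton_eq_map (fun _ => (0 : Int))]
  simp

lemma pvBase_length (Ol : List String) (row : String → List Int) (k : Nat)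
    (hlen : ∀ w ∈ Ol, (row w).length = k) (w : String) : (pvBase Ol row k w).length = k := by
  unfold pvBase
  split_ifs with h
  · exact hlen w h
  · simp

lemma wordloop (d : List String) (k : Nat) (Ol : List String) (row : String → List Int)
    (hnd : Ol.Nodup) (hlen : ∀ w ∈ Ol, (row w).length = k) :
    ∀ (rest seen : List String) (F : PySem.Dict String (List Int)),
      F.items = (pvKeyL Ol seen).map (fun w => (w, pvRowA Ol row k d seen w)) →
      (rest.foldl (pvWordStep d k) F).items =
        (pvKeyL Ol (seen ++ rest)).map (fun w => (w, pvRowA Ol row k d (seen ++ rest) w)) := by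
  intro rest
  induction rest with
  | nil => intro seen F hF; simpa using hF
  | cons x rest ih =>
    intro seen F hF
    have hget := get?_of_items_map F _ _ hF (nodup_pvKeyL Ol seen hnd)
    have hstep : (pvWordStep d k F x).items =
        (pvKeyL Ol (seen ++ [x])).map (fun w => (w, pvRowA Ol row k d (seen ++ [x]) w)) := by
      by_cases hseen : x ∈ seen
      · -- already counted this document: row has length k + 1, both branches skip
        have hkey : pvKeyL Ol (seen ++ [x]) = pvKeyL Ol seen := by
          unfold pvKeyL; rw [ofList_append_singleton_mem seen x hseen]
        have hx : x ∈ pvKeyL Ol seen := (mem_pvKeyL Ol seen x).2 (Or.inr hseen)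
        have hlenx : (pvRowA Ol row k d seen x).length = k + 1 := by
          simp [pvRowA, hseen, pvBase_length Ol row k hlen]
        have hF' : pvWordStep d k F x = F := by
          unfold pvWordStep
          rw [hget x, if_pos hx]
          simp [hlenx]
        rw [hF', hF, hkey]
        apply List.map_congr_left
        intro w hw
        by_cases hws : w ∈ seen
        · simp [pvRowA, hws, List.mem_append]
        · have hwx : w ≠ x := fun h => hws (h ▸ hseen)
          simp [pvRowA, hws, hwx, List.mem_append]
      by_cases hOl : x ∈ Ol
      · -- seen in an earlier document only: append this document's count in place
        have hkey : pvKeyL Ol (seen ++ [x]) = pvKeyL Ol seen := by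
          unfold pvKeyL
          rw [ofList_append_singleton_not_mem seen x hseen]
          simp [List.filter_append, PySem.Set.contains, hOl]
        have hx : x ∈ pvKeyL Ol seen := (mem_pvKeyL Ol seen x).2 (Or.inl hOl)
        have hval : pvRowA Ol row k d seen x = row x := by
          simp [pvRowA, hseen, pvBase, hOl]
        have hcont : F.contains x = true := by
          rw [PySem.Dict.contains_iff_mem_keys, keys_of_items_map F _ _ hF]; exact hx
        have hF' : pvWordStep d k F x = F.insert x (row x ++ [(d.count x : Int)]) := by
          unfold pvWordStep
          rw [hget x, if_pos hx, hval]
          simp [hlen x hOl]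
        rw [hF', PySem.Dict.items_insert_of_contains F _ hcont, hF, hkey, List.map_map]
        apply List.map_congr_left
        intro w hw
        by_cases hwx : w = x
        · subst hwx
          simp [pvRowA, pvBase, hOl, hseen, List.mem_append]
        · have : (w == x) = false := by simp [hwx]
          simp only [Function.comp_apply, this, Bool.false_eq_true, if_false]
          have : (w ∈ seen ++ [x]) ↔ (w ∈ seen) := by simp [List.mem_append, hwx]
          simp [pvRowA, this]
      · -- brand-new word: create the zero-padded row and append it
        have hkey : pvKeyL Ol (seen ++ [x]) = pvKeyL Ol seen ++ [x] := by
          unfold pvKeyL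
          rw [ofList_append_singleton_not_mem seen x hseen]
          simp [List.filter_append, PySem.Set.contains, hOl, List.append_assoc]
        have hx : x ∉ pvKeyL Ol seen := fun h => by
          rcases (mem_pvKeyL Ol seen x).1 h with h' | h' <;> [exact hOl h'; exact hseen h']
        have hcont : F.contains x = false := by
          rw [← Bool.not_eq_true, PySem.Dict.contains_iff_mem_keys, keys_of_items_map F _ _ hF]
          exact hx
        have hF' : pvWordStep d k F x =
            F.insert x (List.replicate k 0 ++ [(d.count x : Int)]) := by
          unfold pvWordStep
          rw [hget x, if_neg hx, range_fold_zeros]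
        rw [hF', PySem.Dict.items_insert_of_not_contains F _ hcont, hF, hkey, List.map_append]
        congr 1
        · apply List.map_congr_left
          intro w hw
          have hwx : w ≠ x := fun h => hx (h ▸ hw)
          have : (w ∈ seen ++ [x]) ↔ (w ∈ seen) := by simp [List.mem_append, hwx]
          simp [pvRowA, this]
        · simp [pvRowA, pvBase, hOl, List.mem_append]
    have h := ih (seen ++ [x]) _ hstep
    simpa [List.append_assoc] using h

lemma padloop (k : Nat) (K : List String) (r : String → List Int) (hnd : K.Nodup) :
    ∀ (rest seen : List String) (G : PySem.Dict String (List Int)),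
      K = seen ++ rest →
      G.items = K.map (fun w => (w, if w ∈ seen then (if (r w).length < k + 1 then r w ++ [(0:Int)] else r w) else r w)) →
      (rest.foldl (pvPadStep k) G).items =
        K.map (fun w => (w, if (r w).length < k + 1 then r w ++ [(0:Int)] else r w)) := by
  intro rest
  induction rest with
  | nil =>
    intro seen G hsplit hG
    rw [List.foldl_nil, hG]
    apply List.map_congr_left
    intro w hw
    have : w ∈ seen := by rw [hsplit, List.append_nil] at hw; exact hw
    simp [this]
  | cons x rest ih =>
    intro seen G hsplit hG
    have hxK : x ∈ K := by rw [hsplit]; simp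
    have hxseen : x ∉ seen := by
      have := hsplit ▸ hnd
      intro hx
      exact (List.disjoint_of_nodup_append this) hx (by simp)
    have hget := get?_of_items_map G _ _ hG hnd
    have hgx : G.get? x = some (r x) := by rw [hget x, if_pos hxK, if_neg hxseen]
    have hstep : (pvPadStep k G x).items =
        K.map (fun w => (w, if w ∈ seen ++ [x] then (if (r w).length < k + 1 then r w ++ [(0:Int)] else r w) else r w)) := by
      have hred : pvPadStep k G x = if (r x).length < k + 1 then G.insert x (r x ++ [(0:Int)]) else G := by
        unfold pvPadStep; rw [hgx]
      rw [hred]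
      by_cases hlt : (r x).length < k + 1
      · rw [if_pos hlt]
        have hcont : G.contains x = true := by
          rw [PySem.Dict.contains_iff_mem_keys, keys_of_items_map G _ _ hG]; exact hxK
        rw [PySem.Dict.items_insert_of_contains G _ hcont, hG, List.map_map]
        apply List.map_congr_left
        intro w hw
        by_cases hwx : w = x
        · subst hwx; simp [hlt, List.mem_append]
        · have : (w == x) = false := by simp [hwx]
          simp only [Function.comp_apply, this, Bool.false_eq_true, if_false]
          have : (w ∈ seen ++ [x]) ↔ (w ∈ seen) := by simp [List.mem_append, hwx]
          simp [this]
      · rw [if_neg hlt, hG]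
        apply List.map_congr_left
        intro w hw
        by_cases hwx : w = x
        · subst hwx; simp [hlt, hxseen, List.mem_append]
        · have : (w ∈ seen ++ [x]) ↔ (w ∈ seen) := by simp [List.mem_append, hwx]
          simp [this]
    have h := ih (seen ++ [x]) _ (by rw [hsplit, List.append_assoc]; rfl) hstep
    rw [List.foldl_cons]
    exact h

lemma docStep_items (Ol : List String) (row : String → List Int) (k : Nat) (d : List String)
    (hnd : Ol.Nodup) (hlen : ∀ w ∈ Ol, (row w).length = k)
    (F : PySem.Dict String (List Int)) (hF : F.items = Ol.map (fun w => (w, row w))) :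
    (pvDocStep k F d).items =
      (pvKeyL Ol d).map (fun w => (w, pvBase Ol row k w ++ [(d.count w : Int)])) := by
  unfold pvDocStep
  have h0 : F.items = (pvKeyL Ol []).map (fun w => (w, pvRowA Ol row k d [] w)) := by
    rw [hF]
    have : pvKeyL Ol [] = Ol := by unfold pvKeyL; simp [PySem.Set.ofList]
    rw [this]
    apply List.map_congr_left
    intro w hw
    simp [pvRowA, pvBase, hw]
  have h1 := wordloop d k Ol row hnd hlen d [] F h0
  rw [List.nil_append] at h1
  have hkeys : (d.foldl (pvWordStep d k) F).keys = pvKeyL Ol d :=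
    keys_of_items_map _ _ _ h1
  have h2 := padloop k (pvKeyL Ol d) (pvRowA Ol row k d d) (nodup_pvKeyL Ol d hnd)
      (pvKeyL Ol d) [] (d.foldl (pvWordStep d k) F) (by rw [List.nil_append]) (by
        rw [h1]
        apply List.map_congr_left
        intro w hw
        simp)
  show (List.foldl (pvPadStep k) (d.foldl (pvWordStep d k) F)
      ((d.foldl (pvWordStep d k) F).keys)).items = _
  rw [hkeys, h2]
  apply List.map_congr_left
  intro w hw
  by_cases hd : w ∈ d
  · have hL : (pvRowA Ol row k d d w).length = k + 1 := by
      simp [pvRowA, hd, pvBase_length Ol row k hlen]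
    rw [if_neg (by rw [hL]; omega)]
    simp [pvRowA, hd]
  · have hL : (pvRowA Ol row k d d w).length = k := by
      simp [pvRowA, hd, pvBase_length Ol row k hlen]
    have hcnt : d.count w = 0 := List.count_eq_zero.2 hd
    rw [if_pos (by rw [hL]; omega)]
    simp [pvRowA, hd, hcnt]

lemma count_flat_zero (P : List (List String)) (w : String) (h : w ∉ P.flatMap (fun doc => doc)) :
    P.map (fun doc => (doc.count w : Int)) = List.replicate P.length 0 := by
  rw [List.eq_replicate_iff]
  simp only [List.length_map, true_and, List.mem_map]
  rintro x ⟨doc, hdoc, rfl⟩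
  have : w ∉ doc := fun hw => h (List.mem_flatMap.2 ⟨doc, hdoc, hw⟩)
  simp [List.count_eq_zero.2 this]

lemma foldl_state (P : List (List String)) :
    (P.foldl (fun (st : PySem.Dict String (List Int) × Nat) doc => (pvDocStep st.2 st.1 doc, st.2 + 1))
        (PySem.Dict.empty, 0)).2 = P.length ∧
    (P.foldl (fun (st : PySem.Dict String (List Int) × Nat) doc => (pvDocStep st.2 st.1 doc, st.2 + 1))
        (PySem.Dict.empty, 0)).1.items =
      (PySem.Set.ofList (P.flatMap (fun doc => doc))).map
        (fun w => (w, P.map (fun doc => (doc.count w : Int)))) := by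
  induction P using List.reverseRecOn with
  | nil => exact ⟨rfl, rfl⟩
  | append_singleton P d ih =>
    obtain ⟨hk, hitems⟩ := ih
    rw [List.foldl_append, List.foldl_cons, List.foldl_nil]
    constructor
    · simp [hk]
    · have hstep := docStep_items (PySem.Set.ofList (P.flatMap (fun doc => doc)))
        (fun w => P.map (fun doc => (doc.count w : Int))) P.length d
        (PySem.Set.nodup_ofList _) (by intro w _; simp) _ hitems
      show (pvDocStep
          (P.foldl (fun (st : PySem.Dict String (List Int) × Nat) doc => (pvDocStep st.2 st.1 doc, st.2 + 1)) (PySem.Dict.empty, 0)).2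
          (P.foldl (fun (st : PySem.Dict String (List Int) × Nat) doc => (pvDocStep st.2 st.1 doc, st.2 + 1)) (PySem.Dict.empty, 0)).1
          d).items = _
      rw [hk, hstep]
      have hkey : PySem.Set.ofList ((P ++ [d]).flatMap (fun doc => doc)) =
          pvKeyL (PySem.Set.ofList (P.flatMap (fun doc => doc))) d := by
        rw [List.flatMap_append, PySem.Set.ofList_append, PySem.Set.update_eq_append_filter]
        unfold pvKeyL
        simp
      rw [hkey]
      apply List.map_congr_left
      intro w hw
      have hrow : (P ++ [d]).map (fun doc => (doc.count w : Int)) =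
          P.map (fun doc => (doc.count w : Int)) ++ [(d.count w : Int)] := by simp
      rw [hrow]
      by_cases hP : w ∈ PySem.Set.ofList (P.flatMap (fun doc => doc))
      · rw [pvBase, if_pos hP]
      · have hz := count_flat_zero P w (fun h => hP ((PySem.Set.mem_ofList _ _).2 h))
        rw [pvBase, if_neg hP, ← hz]

-- ===== VERDICT (by name: the statement is the Claim_ definition above) =====
theorem get_word_frequency_spec : Claim_equal_get_word_frequency := by
  intro documents _
  show get_word_frequency documents = get_word_frequency_alt documents
  unfold get_word_frequency get_word_frequency_alt
  rw [(foldl_state documents).2]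
  have : PySem.List.dedup (documents.flatMap (fun doc => doc)) =
      PySem.Set.ofList (documents.flatMap (fun doc => doc)) := rfl
  rw [this]
  apply List.map_congr_left
  intro w hw
  simp [pvTally, PySem.Dict.getD_foldl_insert_add_one, List.map_map, Function.comp_def]
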